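-- pv_equiv track=rewrite | github.com/pawanshukla03/maritime-assesment | backend/pdf_loader.py | _last_break_in_zone
-- ===== SOURCE A (Python) =====
-- def _last_break_in_zone(text: str, start: int, end: int) -> int:
--     """Return the index of the last paragraph/sentence break in text[start:end], or start."""
--     segment = text[start:end]
--     best = -1
--     for sep in ("\n\n", "\n", ". ", "? ", "! ", "; "):
--         idx = segment.rfind(sep)
--         if idx >= 0:
--             idx += len(sep)
--             if idx > best:
--                 best = idx
--     return start + best if best >= 0 else start
-- ===== SOURCE B (Python) =====
-- _SEPS = ("\n\n", "\n", ". ", "? ", "! ", "; ")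
--
-- def _last_break_in_zone(text: str, start: int, end: int) -> int:
--     """Return the index of the last paragraph/sentence break in text[start:end], or start."""
--     segment = text[start:end]
--     best = -1
--     for i in range(len(segment)):
--         for sep in _SEPS:
--             if segment.startswith(sep, i):
--                 best = max(best, i + len(sep))
--     return start + best if best >= 0 else start
-- ===== Notes on version B (the rewrite author's own statement) =====
-- stated objective: alternative
-- what changed: Replaces the six backward rfind scans over the segment with a single forward pass that checks each position for each separator with startswith and keeps the running maximum end-of-break index.
import Mathlib
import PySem

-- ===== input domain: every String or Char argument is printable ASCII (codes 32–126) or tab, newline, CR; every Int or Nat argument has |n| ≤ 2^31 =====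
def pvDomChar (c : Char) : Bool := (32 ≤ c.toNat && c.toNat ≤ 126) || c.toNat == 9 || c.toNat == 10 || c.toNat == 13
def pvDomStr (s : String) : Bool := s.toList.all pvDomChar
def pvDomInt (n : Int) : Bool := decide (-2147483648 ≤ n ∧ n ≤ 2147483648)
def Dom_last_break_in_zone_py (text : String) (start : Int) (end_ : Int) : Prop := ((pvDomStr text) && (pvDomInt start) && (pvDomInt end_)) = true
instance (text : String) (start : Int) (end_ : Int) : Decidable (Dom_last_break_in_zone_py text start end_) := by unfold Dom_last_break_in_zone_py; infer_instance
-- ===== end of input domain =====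

-- B replaces A's six backward rfind scans by one forward pass keeping the maximum
-- end-of-break position (objective: alternative decomposition, same return value).

-- ===== PORT A =====
def sepsA : List String := ["\n\n", "\n", ". ", "? ", "! ", "; "]

def last_break_in_zone_py (text : String) (start : Int) (end_ : Int) : Int :=
  let segment := PySem.Str.slice text (some start) (some end_)
  let best := sepsA.foldl (fun best sep =>
    let idx := PySem.Str.rfind segment sep
    if 0 ≤ idx then
      let idx := idx + PySem.Str.len sep
      if best < idx then idx else best
    else best) (-1)
  if 0 ≤ best then start + best else start

-- ===== PORT B =====
def sepsB : List (List Char) := [['\n','\n'], ['\n'], ['.',' '], ['?',' '], ['!',' '], [';',' ']]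

def last_break_in_zone_py_alt (text : String) (start : Int) (end_ : Int) : Int :=
  let seg := PySem.Chars.slice text.toList (some start) (some end_)
  let best := (List.range seg.length).foldl (fun best i =>
    sepsB.foldl (fun b sep =>
      -- segment.startswith(sep, i): exact as a prefix test on seg.drop i, since 0 ≤ i < len(seg)
      if sep.isPrefixOf (seg.drop i) then max b ((i : Int) + sep.length) else b) best) (-1)
  if 0 ≤ best then start + best else start

-- ===== PRECONDITION & SPEC =====
def Spec_last_break_in_zone_py (text : String) (start : Int) (end_ : Int) (out : Int) : Prop := out = last_break_in_zone_py_alt text start end_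
instance (text : String) (start : Int) (end_ : Int) (out : Int) : Decidable (Spec_last_break_in_zone_py text start end_ out) := by unfold Spec_last_break_in_zone_py; infer_instance

-- ===== CLAIM (what is proved, stated in full; the proofs are below) =====
def Claim_equal_last_break_in_zone_py : Prop := ∀ (text : String) (start : Int) (end_ : Int), Dom_last_break_in_zone_py text start end_ → Spec_last_break_in_zone_py text start end_ (last_break_in_zone_py text start end_)

-- ===== LEMMAS AND PROOFS =====

/-- The candidate produced by separator `p.2` at position `p.1` of `l`, if it matches there. -/
def pvG (l : List Char) (p : Nat × List Char) : Option Int :=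
  if p.2.isPrefixOf (l.drop p.1) then some ((p.1 : Int) + p.2.length) else none

lemma foldl_max_init : ∀ (xs : List Int) (b : Int), b ≤ xs.foldl max b := by
  intro xs
  induction xs with
  | nil => simp
  | cons x xs ih => intro b; exact le_trans (le_max_left b x) (ih (max b x))

lemma foldl_max_mem : ∀ (xs : List Int) (b x : Int), x ∈ xs → x ≤ xs.foldl max b := by
  intro xs
  induction xs with
  | nil => simp
  | cons y ys ih =>
    intro b x hx
    rcases List.mem_cons.1 hx with h | h
    · subst h; exact le_trans (le_max_right b x) (foldl_max_init ys _)
    · exact ih _ _ h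

lemma foldl_max_le : ∀ (xs : List Int) (b M : Int), b ≤ M → (∀ x ∈ xs, x ≤ M) →
    xs.foldl max b ≤ M := by
  intro xs
  induction xs with
  | nil => intro b M hb _; simpa using hb
  | cons y ys ih =>
    intro b M hb h
    exact ih _ _ (max_le hb (h y (by simp))) (fun x hx => h x (by simp [hx]))

lemma foldl_max_eq_max (xs : List Int) (b M : Int) (hmem : M ∈ xs)
    (hub : ∀ x ∈ xs, x ≤ M) : xs.foldl max b = max b M := by
  refine le_antisymm (foldl_max_le xs b (max b M) (le_max_left _ _)
    (fun x hx => le_trans (hub x hx) (le_max_right _ _))) ?_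
  exact max_le (foldl_max_init xs b) (foldl_max_mem xs b M hmem)

lemma foldl_max_perm : ∀ {xs ys : List Int}, xs.Perm ys → ∀ (b : Int),
    xs.foldl max b = ys.foldl max b := by
  intro xs ys h
  induction h with
  | nil => intro b; rfl
  | cons x _ ih => intro b; simpa using ih (max b x)
  | swap x y l => intro b; simp [List.foldl, max_right_comm]
  | trans _ _ ih1 ih2 => intro b; exact (ih1 b).trans (ih2 b)

/-- B's inner loop over the separators is a max-fold over the candidates at `i`. -/
lemma foldl_if_max (l : List Char) (i : Nat) : ∀ (ss : List (List Char)) (b : Int),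
    ss.foldl (fun b sep =>
      if sep.isPrefixOf (l.drop i) then max b ((i : Int) + sep.length) else b) b
    = (ss.filterMap (fun s => pvG l (i, s))).foldl max b := by
  intro ss
  induction ss with
  | nil => intro b; rfl
  | cons s ss ih =>
    intro b
    by_cases h : s <+: l.drop i
    · simpa [pvG, List.isPrefixOf_iff_prefix, h] using ih (max b ((i : Int) + s.length))
    · simpa [pvG, List.isPrefixOf_iff_prefix, h] using ih b

/-- Folding max-folds over a list is a max-fold over the flattened candidates. -/
lemma foldl_foldl_max {α : Type} : ∀ (xs : List α) (h : α → List Int) (b : Int),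
    xs.foldl (fun b x => (h x).foldl max b) b = (xs.flatMap h).foldl max b := by
  intro xs
  induction xs with
  | nil => intro h b; rfl
  | cons x xs ih => intro h b; simp [List.foldl_append, ih]

/-- `rfind.go l sub m` is the largest `j ≤ m` at which `sub` matches, or `-1`. -/
lemma rfind_go_cases (l sub : List Char) : ∀ (m : Nat),
    (PySem.Chars.rfind.go l sub m = -1 ∧ ∀ j ≤ m, sub.isPrefixOf (l.drop j) = false) ∨
    (∃ j : Nat, PySem.Chars.rfind.go l sub m = (j : Int) ∧ j ≤ m ∧
      sub.isPrefixOf (l.drop j) = true ∧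
      ∀ k, j < k → k ≤ m → sub.isPrefixOf (l.drop k) = false) := by
  intro m
  induction m with
  | zero =>
    by_cases h : sub.isPrefixOf l
    · right; exact ⟨0, by simp [PySem.Chars.rfind.go, h], le_refl 0, by simpa using h,
        fun k hk1 hk2 => by omega⟩
    · left
      refine ⟨by simp [PySem.Chars.rfind.go, h], fun j hj => ?_⟩
      interval_cases j
      simpa using Bool.eq_false_iff.2 h
  | succ m ih =>
    by_cases h : sub.isPrefixOf (l.drop (m + 1))
    · right
      exact ⟨m + 1, by simp [PySem.Chars.rfind.go, h], le_refl _, by simpa using h,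
        fun k hk1 hk2 => by omega⟩
    · rcases ih with ⟨hval, hnone⟩ | ⟨j, hval, hle, hmatch, hmax⟩
      · left
        refine ⟨by simp [PySem.Chars.rfind.go, h, hval], fun j hj => ?_⟩
        rcases Nat.lt_or_ge j (m + 1) with hj' | hj'
        · exact hnone j (by omega)
        · have : j = m + 1 := by omega
          subst this; exact Bool.eq_false_iff.2 h
      · right
        refine ⟨j, by simp [PySem.Chars.rfind.go, h, hval], by omega, hmatch, ?_⟩
        intro k hk1 hk2
        rcases Nat.lt_or_ge k (m + 1) with hk' | hk'
        · exact hmax k hk1 (by omega)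
        · have : k = m + 1 := by omega
          subst this; exact Bool.eq_false_iff.2 h

lemma match_lt_length {l sub : List Char} {j : Nat} (hs : sub ≠ [])
    (h : sub.isPrefixOf (l.drop j) = true) : j < l.length := by
  by_contra hc
  rw [List.drop_eq_nil_of_le (by omega)] at h
  have := (List.isPrefixOf_iff_prefix).1 h
  exact hs (List.prefix_nil.1 this)

/-- A's per-separator step equals the max-fold over all candidates of that separator. -/
lemma stepA_eq (l sub : List Char) (hs : sub ≠ []) (b : Int) :
    (if 0 ≤ PySem.Chars.rfind l sub then
      (if b < PySem.Chars.rfind l sub + (sub.length : Int)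
        then PySem.Chars.rfind l sub + (sub.length : Int) else b)
      else b)
    = ((List.range l.length).filterMap (fun i => pvG l (i, sub))).foldl max b := by
  rcases rfind_go_cases l sub l.length with ⟨hval, hnone⟩ | ⟨j, hval, _, hmatch, hmax⟩
  · rw [show PySem.Chars.rfind l sub = PySem.Chars.rfind.go l sub l.length from rfl, hval]
    have : (List.range l.length).filterMap (fun i => pvG l (i, sub)) = [] := by
      rw [List.filterMap_eq_nil_iff]
      intro i hi
      simp only [pvG]
      rw [hnone i (le_of_lt (List.mem_range.1 hi))]
      rfl
    rw [this]; norm_num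
  · rw [show PySem.Chars.rfind l sub = PySem.Chars.rfind.go l sub l.length from rfl, hval]
    have hjlt : j < l.length := match_lt_length hs hmatch
    have hmem : ((j : Int) + (sub.length : Int)) ∈
        (List.range l.length).filterMap (fun i => pvG l (i, sub)) := by
      refine List.mem_filterMap.2 ⟨j, List.mem_range.2 hjlt, ?_⟩
      simp [pvG, hmatch]
    have hub : ∀ x ∈ (List.range l.length).filterMap (fun i => pvG l (i, sub)),
        x ≤ (j : Int) + (sub.length : Int) := by
      intro x hx
      rcases List.mem_filterMap.1 hx with ⟨i, hi, hgi⟩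
      simp only [pvG] at hgi
      by_cases hm : sub.isPrefixOf (l.drop i)
      · rw [if_pos hm] at hgi
        have : x = (i : Int) + (sub.length : Int) := (Option.some_inj.1 hgi).symm
        subst this
        have hij : i ≤ j := by
          by_contra hc
          have := hmax i (by omega) (le_of_lt (List.mem_range.1 hi))
          rw [this] at hm; simp at hm
        omega
      · rw [if_neg hm] at hgi; exact absurd hgi (by simp)
    rw [foldl_max_eq_max _ b _ hmem hub]
    have : (0 : Int) ≤ (j : Int) := Int.natCast_nonneg j
    rcases lt_or_ge b ((j : Int) + (sub.length : Int)) with h' | h' <;>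
      simp [h', max_def] <;> omega

/-- A's whole fold over the separators, rewritten to char lists and candidates. -/
lemma foldA (segment : String) : ∀ (ss : List String) (b : Int),
    (∀ s ∈ ss, s.toList ≠ []) →
    ss.foldl (fun best sep =>
      let idx := PySem.Str.rfind segment sep
      if 0 ≤ idx then
        let idx := idx + PySem.Str.len sep
        if best < idx then idx else best
      else best) b
    = ((ss.map String.toList).flatMap (fun sub =>
        (List.range segment.toList.length).filterMap (fun i => pvG segment.toList (i, sub)))).foldl max b := by
  intro ss
  induction ss with
  | nil => intro b _; rfl
  | cons s ss ih =>
    intro b hne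
    simp only [List.foldl_cons, List.map_cons, List.flatMap_cons, List.foldl_append]
    rw [← ih _ (fun t ht => hne t (by simp [ht]))]
    congr 1
    simp only [PySem.Str.rfind_eq, PySem.Str.len_eq]
    exact stepA_eq segment.toList s.toList (hne s (by simp)) b

lemma flatMap_filterMap_product {α β γ : Type} :
    ∀ (xs : List α) (ys : List β) (f : α × β → Option γ),
    xs.flatMap (fun a => ys.filterMap (fun b => f (a, b))) = (xs ×ˢ ys).filterMap f := by
  intro xs
  induction xs with
  | nil => intro ys f; rfl
  | cons x xs ih =>
    intro ys f
    simp only [List.flatMap_cons, List.product_cons, List.filterMap_append, ih,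
      List.filterMap_map]
    rfl

lemma pairs_perm (n : Nat) (ss : List (List Char)) (hss : ss.Nodup) :
    ((List.range n) ×ˢ ss).Perm ((ss ×ˢ (List.range n)).map Prod.swap) := by
  rw [List.perm_ext_iff_of_nodup (List.Nodup.product (List.nodup_range) hss)
    (List.Nodup.map Prod.swap_injective (List.Nodup.product hss (List.nodup_range)))]
  rintro ⟨i, s⟩
  constructor
  · intro h
    rcases List.mem_product.1 h with ⟨h1, h2⟩
    exact List.mem_map.2 ⟨(s, i), List.mem_product.2 ⟨h2, h1⟩, rfl⟩
  · intro h
    rcases List.mem_map.1 h with ⟨⟨s', i'⟩, hmem, heq⟩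
    rcases Prod.mk.injEq .. ▸ heq with ⟨h1, h2⟩
    subst h1; subst h2
    rcases List.mem_product.1 hmem with ⟨h1, h2⟩
    exact List.mem_product.2 ⟨h2, h1⟩

-- ===== VERDICT (by name: the statement is the Claim_ definition above) =====
theorem last_break_in_zone_py_spec : Claim_equal_last_break_in_zone_py := by
  intro text start end_ _
  unfold Spec_last_break_in_zone_py last_break_in_zone_py last_break_in_zone_py_alt
  simp only []
  set l : List Char := PySem.Chars.slice text.toList (some start) (some end_) with hl
  have hseg : (PySem.Str.slice text (some start) (some end_)).toList = l :=
    PySem.Str.toList_slice text (some start) (some end_)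
  -- A's best, as a max-fold over candidates
  have hne : ∀ s ∈ sepsA, s.toList ≠ [] := by decide
  have hmap : sepsA.map String.toList = sepsB := by decide
  have hA := foldA (PySem.Str.slice text (some start) (some end_)) sepsA (-1) hne
  rw [hseg, hmap] at hA
  -- B's best, as a max-fold over candidates
  have hB : (List.range l.length).foldl (fun best i =>
      sepsB.foldl (fun b sep =>
        if sep.isPrefixOf (l.drop i) then max b ((i : Int) + sep.length) else b) best) (-1)
      = ((List.range l.length).flatMap (fun i =>
          sepsB.filterMap (fun s => pvG l (i, s)))).foldl max (-1) := by
    rw [← foldl_foldl_max]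
    exact PySem.List.foldl_congr_mem _ _ _ _ (fun b i _ => foldl_if_max l i sepsB b)
  -- connect the two candidate lists by a permutation
  have hLB : (List.range l.length).flatMap (fun i => sepsB.filterMap (fun s => pvG l (i, s)))
      = ((List.range l.length) ×ˢ sepsB).filterMap (pvG l) :=
    flatMap_filterMap_product _ _ _
  have hLA : sepsB.flatMap (fun sub =>
        (List.range l.length).filterMap (fun i => pvG l (i, sub)))
      = ((sepsB ×ˢ (List.range l.length)).map Prod.swap).filterMap (pvG l) := by
    rw [List.filterMap_map]
    exact flatMap_filterMap_product sepsB (List.range l.length) (pvG l ∘ Prod.swap)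
  have hperm := (pairs_perm l.length sepsB (by decide)).filterMap (pvG l)
  have : sepsA.foldl (fun best sep =>
      let idx := PySem.Str.rfind (PySem.Str.slice text (some start) (some end_)) sep
      if 0 ≤ idx then
        let idx := idx + PySem.Str.len sep
        if best < idx then idx else best
      else best) (-1)
      = (List.range l.length).foldl (fun best i =>
      sepsB.foldl (fun b sep =>
        if sep.isPrefixOf (l.drop i) then max b ((i : Int) + sep.length) else b) best) (-1) := by
    rw [hA, hB, hLA, hLB]
    exact (foldl_max_perm hperm (-1)).symm
  rw [this]
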